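-- pv_equiv track=rewrite | github.com/SungHwanYun/Coding-Test-in-One-Volume-with-Python-book- | 4-2-4.py | solve
-- ===== SOURCE A (Python) =====
-- def solve(A, n):
--     m = len(A)
--
--     if m == n:
--         return 1
--
--     ret = 0
--     if m == 0:
--         s, e = 1, 9
--     else:
--         s = max(A[m - 1] - 2, 1)
--         e = min(A[m - 1] + 2, 9)
--
--     for a in range(s, e + 1):
--         A.append(a)
--         ret += solve(A, n)
--         A.pop()
--
--     return ret
-- ===== SOURCE B (Python) =====
-- def solve(A, n):
--     m = len(A)
--     if m == n:
--         return 1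
--     if m == 0:
--         starts = list(range(1, 10))
--     else:
--         last = A[-1]
--         starts = list(range(max(last - 2, 1), min(last + 2, 9) + 1))
--     if not starts:
--         return 0
--     # cnt[d] = number of ways to extend a sequence ending in digit d by t more digits
--     cnt = [1] * 10
--     for _ in range(n - m - 1):
--         cnt = [sum(cnt[e] for e in range(max(d - 2, 1), min(d + 2, 9) + 1))
--                for d in range(10)]
--     return sum(cnt[d] for d in starts)
-- ===== Notes on version B (the rewrite author's own statement) =====
-- stated objective: alternative
-- what changed: A enumerates every digit sequence by branching recursion (appending each allowed next digit and recursing); B builds a bottom-up DP table cnt[d] = number of ways to extend a sequence ending in digit d by t more digits, iterating one transition pass per remaining position and summing the row reachable from the start state.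
import Mathlib
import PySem

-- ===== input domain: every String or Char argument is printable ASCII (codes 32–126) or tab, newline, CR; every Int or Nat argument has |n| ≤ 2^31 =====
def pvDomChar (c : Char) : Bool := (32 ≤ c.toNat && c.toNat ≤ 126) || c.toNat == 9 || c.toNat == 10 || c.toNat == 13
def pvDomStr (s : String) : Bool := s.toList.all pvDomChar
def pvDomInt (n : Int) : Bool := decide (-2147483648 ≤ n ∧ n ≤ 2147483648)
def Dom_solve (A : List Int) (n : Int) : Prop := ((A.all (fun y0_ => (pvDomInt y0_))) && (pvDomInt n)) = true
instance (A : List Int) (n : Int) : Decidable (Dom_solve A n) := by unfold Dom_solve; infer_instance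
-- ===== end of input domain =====

-- B replaces A's branching recursion over digit sequences by a bottom-up DP table over the
-- last digit (objective: alternative). A mutates A in place but restores it before returning;
-- the return value is what is compared.

-- ===== PORT A =====
-- Python A recurses while appending to A; the recursion depth from a state of length m is
-- n - m, so the fuel (n - len A).toNat + 1 is a totality guard only — on every input
-- admitted by Pre_solve it never runs out (Python has no such bound).
def solveAux : Nat → List Int → Int → Int
  | 0, _, _ => 0
  | fuel+1, A, n =>
    let m := A.length
    if (m : Int) = n then 1
    else
      -- A[m-1] is a valid index whenever m > 0, so pyGetD is exact here
      let s : Int := if m = 0 then 1 else max (PySem.List.pyGetD A ((m : Int) - 1) 0 - 2) 1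
      let e : Int := if m = 0 then 9 else min (PySem.List.pyGetD A ((m : Int) - 1) 0 + 2) 9
      (PySem.List.pyRange s (e + 1) 1).foldl
        (fun ret a => ret + solveAux fuel (A ++ [a]) n) 0

def solve (A : List Int) (n : Int) : Int := solveAux ((n - A.length).toNat + 1) A n

-- ===== PORT B =====
-- one DP pass: cnt'[d] = sum(cnt[e] for e in range(max(d-2,1), min(d+2,9)+1))
def stepRow (cnt : List Int) : List Int :=
  (PySem.List.pyRange 0 10 1).map (fun d =>
    (PySem.List.pyRange (max (d - 2) 1) (min (d + 2) 9 + 1) 1).foldl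
      (fun s e => s + cnt.getD e.toNat 0) 0)

def solve_alt (A : List Int) (n : Int) : Int :=
  let m := A.length
  if (m : Int) = n then 1
  else
    -- A[-1] is a valid index since m > 0 in that branch
    let starts : List Int :=
      if m = 0 then PySem.List.pyRange 1 10 1
      else PySem.List.pyRange (max (PySem.List.pyGetD A (-1) 0 - 2) 1)
             (min (PySem.List.pyGetD A (-1) 0 + 2) 9 + 1) 1
    if starts = [] then 0
    else
      let cnt := (PySem.List.pyRange 0 ((n : Int) - m - 1) 1).foldl
        (fun c _ => stepRow c) (List.replicate 10 1)
      starts.foldl (fun s d => s + cnt.getD d.toNat 0) 0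

-- ===== PRECONDITION & SPEC =====
-- Python A diverges (unbounded recursion) exactly when len(A) > n and the last element still
-- admits a successor digit (last in [-1, 11]); Pre_solve admits every input on which A returns.
def Pre_solve (A : List Int) (n : Int) : Prop :=
  (A.length : Int) ≤ n ∨
    (A ≠ [] ∧ (PySem.List.pyGetD A (-1) 0 ≤ -2 ∨ 12 ≤ PySem.List.pyGetD A (-1) 0))
instance (A : List Int) (n : Int) : Decidable (Pre_solve A n) := by unfold Pre_solve; infer_instance
def pvWitness_solve : List Int × Int := ([3], 5)

def Spec_solve (A : List Int) (n : Int) (out : Int) : Prop := out = solve_alt A n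
instance (A : List Int) (n : Int) (out : Int) : Decidable (Spec_solve A n out) := by unfold Spec_solve; infer_instance

-- ===== CLAIM (what is proved, stated in full; the proofs are below) =====
def Claim_equal_solve : Prop := ∀ (A : List Int) (n : Int), Dom_solve A n → Pre_solve A n → Spec_solve A n (solve A n)

-- ===== LEMMAS AND PROOFS =====

-- pvN t d = number of ways to extend a sequence ending in digit d by t more digits
def pvN : Nat → Int → Int
  | 0, _ => 1
  | t+1, d => (PySem.List.pyRange (max (d - 2) 1) (min (d + 2) 9 + 1) 1).foldl
      (fun s e => s + pvN t e) 0

def pvRow (t : Nat) : List Int :=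
  [pvN t 0, pvN t 1, pvN t 2, pvN t 3, pvN t 4, pvN t 5, pvN t 6, pvN t 7, pvN t 8, pvN t 9]

lemma pvRow_getD (t : Nat) (e : Int) (h1 : 1 ≤ e) (h9 : e ≤ 9) :
    (pvRow t).getD e.toNat 0 = pvN t e := by
  interval_cases e <;> rfl

lemma stepRow_pvRow (t : Nat) : stepRow (pvRow t) = pvRow (t + 1) := by
  rfl

lemma rowInv (t : Nat) :
    (PySem.List.pyRange 0 (t : Int) 1).foldl (fun c _ => stepRow c) (List.replicate 10 1)
      = pvRow t := by
  induction t with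
  | zero => rfl
  | succ t ih =>
    have h : ((t : Int) + 1) = ((t + 1 : Nat) : Int) := by push_cast; ring
    rw [← h, PySem.List.pyRange_one_succ_right (by positivity), List.foldl_append, ih,
      List.foldl_cons, List.foldl_nil, stepRow_pvRow]

-- A's recursion computes pvN of the remaining length, for any state of length < n
lemma solveAux_eq (fuel : Nat) : ∀ (A : List Int) (n : Int),
    (A.length : Int) < n → (n - A.length).toNat < fuel →
    solveAux fuel A n =
      (PySem.List.pyRange
          (if A.length = 0 then 1 else max (PySem.List.pyGetD A ((A.length : Int) - 1) 0 - 2) 1)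
          ((if A.length = 0 then 9 else min (PySem.List.pyGetD A ((A.length : Int) - 1) 0 + 2) 9) + 1) 1).foldl
        (fun ret a => ret + pvN (n - A.length - 1).toNat a) 0 := by
  induction fuel with
  | zero => intro A n h hf; omega
  | succ fuel ih =>
    intro A n h hf
    show (if ((A.length : Int) = n) then 1 else _) = _
    rw [if_neg (by omega)]
    have hpoint : ∀ (acc a : Int),
        acc + solveAux fuel (A ++ [a]) n = acc + pvN (n - A.length - 1).toNat a := by
      intro acc a
      congr 1
      -- child state A ++ [a]
      have hlen : ((A ++ [a]).length : Int) = (A.length : Int) + 1 := by simp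
      have hlast : PySem.List.pyGetD (A ++ [a]) (((A ++ [a]).length : Int) - 1) 0 = a := by
        rw [show (((A ++ [a]).length : Int) - 1) = ((A.length : Nat) : Int) by simp,
          PySem.List.pyGetD_natCast]
        simp
      by_cases hend : (A.length : Int) + 1 = n
      · -- child has length n: solveAux returns 1, and pvN 0 a = 1
        have h0 : (n - A.length - 1).toNat = 0 := by omega
        rw [h0]
        cases fuel with
        | zero => omega
        | succ f =>
          show (if (((A ++ [a]).length : Int) = n) then 1 else _) = _
          rw [if_pos (by rw [hlen]; omega)]
          rfl
      · -- child still shorter than n: induction hypothesis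
        have hlt : ((A ++ [a]).length : Int) < n := by rw [hlen]; omega
        rw [ih (A ++ [a]) n hlt (by rw [hlen] at *; omega)]
        have hne : ¬ (A ++ [a]).length = 0 := by simp
        rw [if_neg hne, if_neg hne, hlast]
        have ht : (n - A.length - 1).toNat = (n - (A ++ [a]).length - 1).toNat + 1 := by
          rw [hlen] at *; omega
        rw [ht]
        rfl
    by_cases hz : A.length = 0
    · simp only [if_pos hz]
      exact PySem.List.foldl_congr_mem _ _ _ _ (fun acc x _ => hpoint acc x)
    · simp only [if_neg hz]
      exact PySem.List.foldl_congr_mem _ _ _ _ (fun acc x _ => hpoint acc x)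

lemma empty_range_of_far (last : Int) (hfar : last ≤ -2 ∨ 12 ≤ last) :
    PySem.List.pyRange (max (last - 2) 1) (min (last + 2) 9 + 1) 1 = [] :=
  PySem.List.pyRange_one_eq_nil (by omega)

lemma last_idx (A : List Int) (hAne : A ≠ []) :
    PySem.List.pyGetD A ((A.length : Int) - 1) 0 = PySem.List.pyGetD A (-1) 0 := by
  have hpos : 0 < A.length := List.length_pos_of_ne_nil hAne
  rw [PySem.List.pyGetD_neg_one A 0 hAne,
    show ((A.length : Int) - 1) = ((A.length - 1 : Nat) : Int) by cases A <;> simp_all,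
    PySem.List.pyGetD_natCast, List.getLast_eq_getElem,
    List.getD_eq_getElem?_getD, List.getElem?_eq_getElem (by omega)]
  rfl

-- ===== VERDICT (by name: the statement is the Claim_ definition above) =====
theorem solve_spec : Claim_equal_solve := by
  intro A n _ hpre
  unfold Spec_solve solve solve_alt
  by_cases hmn : (A.length : Int) = n
  · -- m = n: both return 1
    have h0 : (n - A.length).toNat = 0 := by omega
    rw [h0]
    show (if ((A.length : Int) = n) then 1 else _) = _
    rw [if_pos hmn, if_pos hmn]
  · by_cases hlt : (A.length : Int) < n
    · -- m < n: A computes pvN of the remaining length over the start range; so does B's table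
      obtain ⟨k, hk⟩ : ∃ k : Nat, n - A.length - 1 = (k : Int) := ⟨(n - A.length - 1).toNat, by omega⟩
      rw [solveAux_eq _ A n hlt (by omega), if_neg hmn]
      simp only [hk, Int.toNat_natCast, rowInv k]
      have key : ∀ (r : List Int), (∀ x ∈ r, 1 ≤ x ∧ x ≤ 9) →
          r.foldl (fun ret a => ret + pvN k a) 0
            = r.foldl (fun s d => s + (pvRow k).getD d.toNat 0) 0 := by
        intro r hr
        exact PySem.List.foldl_congr_mem r _ _ 0 (fun acc x hx => by
          rw [pvRow_getD k x (hr x hx).1 (hr x hx).2])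
      by_cases hz : A.length = 0
      · simp only [if_pos hz]
        rw [if_neg (by decide)]
        exact key _ (fun x hx => by
          rw [PySem.List.mem_pyRange_one] at hx; omega)
      · simp only [if_neg hz]
        have hAne : A ≠ [] := by cases A <;> simp_all
        rw [last_idx A hAne]
        by_cases hr : PySem.List.pyRange (max (PySem.List.pyGetD A (-1) 0 - 2) 1)
            (min (PySem.List.pyGetD A (-1) 0 + 2) 9 + 1) 1 = ([] : List Int)
        · rw [if_pos hr, hr]
          rfl
        · rw [if_neg hr]
          exact key _ (fun x hx => by
            rw [PySem.List.mem_pyRange_one] at hx; omega)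
    · -- m > n: A's loop range is empty (last element far from the digits), B's start list is
      -- the same empty range; both return 0
      have hAne : A ≠ [] := by
        rcases hpre with h | ⟨h, _⟩
        · omega
        · exact h
      have hfar : PySem.List.pyGetD A (-1) 0 ≤ -2 ∨ 12 ≤ PySem.List.pyGetD A (-1) 0 := by
        rcases hpre with h | ⟨_, h⟩
        · omega
        · exact h
      have hz : ¬ A.length = 0 := by cases A <;> simp_all
      have h0 : (n - A.length).toNat = 0 := by omega
      rw [h0]
      show (if ((A.length : Int) = n) then 1 else _) = _
      rw [if_neg hmn, if_neg hmn]
      simp only [if_neg hz]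
      rw [last_idx A hAne, empty_range_of_far _ hfar]
      rfl
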